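-- pv_equiv track=rewrite | github.com/pypi-data/pypi-mirror-288 | packages/czthry/czthry-0.1.2.tar.gz/czthry-0.1.2/src/czthry/util.py | excludeFiles
-- ===== SOURCE A (Python) =====
-- def excludeFiles(files, exc=None):
--     if exc is None:
--         exc = ['.DS_Store', '__pycache__']
--     arr = []
--     for f in files:
--         ok = 1
--         for e in exc:
--             if e in f:
--                 ok = 0
--                 break
--         if ok:
--             arr.append(f)
--     return arr
-- ===== SOURCE B (Python) =====
-- def excludeFiles(files, exc=None):
--     if exc is None:
--         exc = ['.DS_Store', '__pycache__']
--     kept = list(files)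
--     for e in exc:
--         kept = [f for f in kept if e not in f]
--     return kept
-- ===== Notes on version B (the rewrite author's own statement) =====
-- stated objective: alternative
-- what changed: Inverts the loop nesting: instead of scanning all exclusions per file with a break flag, B folds over the exclusion list and filters the (shrinking) file list once per exclusion.
import Mathlib
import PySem

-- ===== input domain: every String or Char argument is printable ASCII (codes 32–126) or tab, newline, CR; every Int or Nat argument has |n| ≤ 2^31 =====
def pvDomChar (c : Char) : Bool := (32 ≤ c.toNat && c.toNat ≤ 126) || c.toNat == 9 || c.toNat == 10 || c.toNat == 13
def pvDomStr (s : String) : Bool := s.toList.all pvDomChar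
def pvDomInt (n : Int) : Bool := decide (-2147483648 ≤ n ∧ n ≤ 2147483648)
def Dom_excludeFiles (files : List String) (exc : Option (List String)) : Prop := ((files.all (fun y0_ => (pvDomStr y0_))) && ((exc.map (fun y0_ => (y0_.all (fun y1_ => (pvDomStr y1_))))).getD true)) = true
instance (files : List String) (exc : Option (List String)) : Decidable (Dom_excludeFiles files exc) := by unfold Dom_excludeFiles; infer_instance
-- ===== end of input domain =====

-- ===== PORT A =====
-- B inverts the loop nesting (fold over exclusions, filtering the file list); return-value equivalence proved below.
-- inner 'for e in exc: if e in f: ok = 0; break' loop of A, returning the final ok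
def excludeFilesOk (f : String) : List String → Nat
  | [] => 1
  | e :: rest => if PySem.Str.isIn e f then 0 else excludeFilesOk f rest

def excludeFiles (files : List String) (exc : Option (List String)) : List String :=
  let exc := exc.getD [".DS_Store", "__pycache__"]
  files.foldl (fun arr f => if excludeFilesOk f exc ≠ 0 then arr ++ [f] else arr) []

-- ===== PORT B =====
def excludeFiles_alt (files : List String) (exc : Option (List String)) : List String :=
  let exc := exc.getD [".DS_Store", "__pycache__"]
  exc.foldl (fun kept e => kept.filter (fun f => !PySem.Str.isIn e f)) files

-- ===== PRECONDITION & SPEC =====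
def Spec_excludeFiles (files : List String) (exc : Option (List String)) (out : List String) : Prop := out = excludeFiles_alt files exc
instance (files : List String) (exc : Option (List String)) (out : List String) : Decidable (Spec_excludeFiles files exc out) := by unfold Spec_excludeFiles; infer_instance

-- ===== CLAIM (what is proved, stated in full; the proofs are below) =====
def Claim_equal_excludeFiles : Prop := ∀ (files : List String) (exc : Option (List String)), Dom_excludeFiles files exc → Spec_excludeFiles files exc (excludeFiles files exc)

-- ===== LEMMAS AND PROOFS =====
theorem excludeFilesOk_eq (f : String) (l : List String) :
    excludeFilesOk f l = if l.all (fun e => !PySem.Str.isIn e f) then 1 else 0 := by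
  induction l with
  | nil => simp [excludeFilesOk]
  | cons e rest ih =>
      simp only [excludeFilesOk, List.all_cons, ih]
      by_cases h : PySem.Chars.isIn e.toList f.toList = true <;> simp [PySem.Str.isIn, h]

theorem excludeFiles_eq_filter (files : List String) (l : List String) :
    files.foldl (fun arr f => if excludeFilesOk f l ≠ 0 then arr ++ [f] else arr) [] =
      files.filter (fun f => l.all (fun e => !PySem.Str.isIn e f)) := by
  rw [PySem.List.foldl_append_ite_eq_filter]
  apply List.filter_congr
  intro f _
  rw [excludeFilesOk_eq]
  by_cases h : (l.all fun e => !PySem.Str.isIn e f) = true <;> simp_all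

theorem excludeFiles_alt_eq_filter (l : List String) (files : List String) :
    l.foldl (fun kept e => kept.filter (fun f => !PySem.Str.isIn e f)) files =
      files.filter (fun f => l.all (fun e => !PySem.Str.isIn e f)) := by
  induction l generalizing files with
  | nil => simp
  | cons e rest ih =>
      simp only [List.foldl_cons, ih, List.filter_filter]
      apply List.filter_congr
      intro f _
      simp [Bool.and_comm]

-- ===== VERDICT (by name: the statement is the Claim_ definition above) =====
theorem excludeFiles_spec : Claim_equal_excludeFiles := by
  intro files exc _
  unfold Spec_excludeFiles excludeFiles excludeFiles_alt
  rw [excludeFiles_eq_filter, excludeFiles_alt_eq_filter]
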